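-- pv_equiv track=rewrite | github.com/mhansenite/locaust-loadtests | oldstuff/fix_locust_from_har.py | remove_css_requests
-- ===== SOURCE A (Python) =====
-- def remove_css_requests(content):
--     """Remove all CSS and font file request blocks from the content"""
--     # Simple and efficient approach: find CSS/font blocks by looking for key identifiers
--     # and then remove the entire with block
--
--     lines = content.split('\n')
--     new_lines = []
--     i = 0
--     total_removed = 0
--
--     while i < len(lines):
--         line = lines[i]
--
--         # Check if this line starts a request block that we want to remove
--         if 'with self.client.request(' in line:
--             # Look ahead to see if this is a CSS request
--             is_css_request = False
--             block_start = i
--             block_end = i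
--
--             # Scan through the block to find CSS indicators and the closing
--             j = i
--             while j < len(lines):
--                 current_line = lines[j]
--
--                 # Check for CSS and font indicators
--                 if ('.css"' in current_line or
--                     '"Sec-Fetch-Dest": "style"' in current_line or
--                     '"Accept": "text/css' in current_line or
--                     '.woff"' in current_line or
--                     '.woff2"' in current_line or
--                     '.ttf"' in current_line or
--                     '.otf"' in current_line or
--                     '"Sec-Fetch-Dest": "font"' in current_line or
--                     '"Accept": "application/font' in current_line):
--                     is_css_request = True
--
--                 # Find the end of the block
--                 if ') as resp:' in current_line:
--                     # Look for the 'pass' statement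
--                     k = j + 1
--                     while k < len(lines) and 'pass' not in lines[k].strip():
--                         k += 1
--                     if k < len(lines):
--                         block_end = k
--                         break
--                 j += 1
--
--             if is_css_request:
--                 # Skip this entire block
--                 i = block_end + 1
--                 total_removed += 1
--                 continue
--
--         # Keep this line
--         new_lines.append(line)
--         i += 1
--
--     return '\n'.join(new_lines), total_removed
-- ===== SOURCE B (Python) =====
-- _CSS_TOKENS = (
--     '.css"',
--     '"Sec-Fetch-Dest": "style"',
--     '"Accept": "text/css',
--     '.woff"',
--     '.woff2"',
--     '.ttf"',
--     '.otf"',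
--     '"Sec-Fetch-Dest": "font"',
--     '"Accept": "application/font',
-- )
--
--
-- def _scan_block(lines, i):
--     """Scan forward from line i: report whether the block is a CSS/font request
--     and the index of its closing 'pass' line (i itself if none is found)."""
--     is_css = False
--     block_end = i
--     j = i
--     while j < len(lines):
--         cur = lines[j]
--         if any(tok in cur for tok in _CSS_TOKENS):
--             is_css = True
--         if ') as resp:' in cur:
--             k = j + 1
--             while k < len(lines) and 'pass' not in lines[k].strip():
--                 k += 1
--             if k < len(lines):
--                 block_end = k
--                 break
--         j += 1
--     return is_css, block_end
--
--
-- def remove_css_requests(content):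
--     """Remove all CSS and font file request blocks from the content"""
--     lines = content.split('\n')
--     # Pass 1: collect the inclusive index spans of CSS/font blocks to delete.
--     spans = []
--     i = 0
--     while i < len(lines):
--         if 'with self.client.request(' in lines[i]:
--             is_css, block_end = _scan_block(lines, i)
--             if is_css:
--                 spans.append((i, block_end))
--                 i = block_end + 1
--                 continue
--         i += 1
--     # Pass 2: rebuild the text, dropping every line covered by a span.
--     out = '\n'.join(line for idx, line in enumerate(lines)
--                     if not any(s <= idx <= e for s, e in spans))
--     return out, len(spans)
-- ===== Notes on version B (the rewrite author's own statement) =====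
-- stated objective: alternative
-- what changed: A's single interleaved loop that appends kept lines while skipping CSS/font blocks is replaced by a two-pass decomposition: a first pass collects the inclusive index spans of CSS/font blocks (with the same forward scan), and a second, separate pass rebuilds the text by filtering enumerate(lines) on span membership; the count is len(spans).
import Mathlib
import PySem

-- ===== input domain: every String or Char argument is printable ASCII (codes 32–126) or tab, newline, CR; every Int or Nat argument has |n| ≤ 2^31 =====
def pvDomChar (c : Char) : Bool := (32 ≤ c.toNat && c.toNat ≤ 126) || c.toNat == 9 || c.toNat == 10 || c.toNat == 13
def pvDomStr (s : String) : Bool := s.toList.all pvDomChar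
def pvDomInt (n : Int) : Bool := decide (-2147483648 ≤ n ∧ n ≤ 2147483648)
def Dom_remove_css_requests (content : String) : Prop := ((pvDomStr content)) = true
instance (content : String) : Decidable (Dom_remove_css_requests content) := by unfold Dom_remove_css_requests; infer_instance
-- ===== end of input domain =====

-- B replaces A's interleaved append-as-you-go loop with two passes: collect the index
-- spans of CSS/font blocks, then filter the lines by span membership (objective: alternative decomposition).
-- All while loops are ported with a structural fuel of lines.length (a pure totality guard:
-- each loop advances its index by ≥ 1 per step, so lines.length steps always suffice).

-- ===== PORT A =====

-- inner 'k' while loop of A: first line ≥ k whose strip contains 'pass'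
def pvFindPass (lines : List String) : Nat → Nat → Option Nat
  | 0, _ => none
  | fuel + 1, k =>
    if h : k < lines.length then
      if PySem.Str.isIn "pass" (PySem.Str.strip lines[k]) then some k
      else pvFindPass lines fuel (k + 1)
    else none

-- A's or-chain of CSS/font indicators on one line
def pvIsCssLineA (cur : String) : Bool :=
  PySem.Str.isIn ".css\"" cur ||
  PySem.Str.isIn "\"Sec-Fetch-Dest\": \"style\"" cur ||
  PySem.Str.isIn "\"Accept\": \"text/css" cur ||
  PySem.Str.isIn ".woff\"" cur ||
  PySem.Str.isIn ".woff2\"" cur ||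
  PySem.Str.isIn ".ttf\"" cur ||
  PySem.Str.isIn ".otf\"" cur ||
  PySem.Str.isIn "\"Sec-Fetch-Dest\": \"font\"" cur ||
  PySem.Str.isIn "\"Accept\": \"application/font" cur

-- A's inner 'j' while loop (the conditional 'is_css = True' update is passed along inline)
def pvScanA (lines : List String) : Nat → Nat → Bool → Nat → Bool × Nat
  | 0, _, isCss, blockEnd => (isCss, blockEnd)
  | fuel + 1, j, isCss, blockEnd =>
    if h : j < lines.length then
      if PySem.Str.isIn ") as resp:" lines[j] then
        match pvFindPass lines lines.length (j + 1) with
        | some k => ((if pvIsCssLineA lines[j] then true else isCss), k)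
        | none => pvScanA lines fuel (j + 1) (if pvIsCssLineA lines[j] then true else isCss) blockEnd
      else pvScanA lines fuel (j + 1) (if pvIsCssLineA lines[j] then true else isCss) blockEnd
    else (isCss, blockEnd)

-- A's outer while loop: returns (new_lines suffix from i, total_removed from i)
def pvGoA (lines : List String) : Nat → Nat → List String × Int
  | 0, _ => ([], 0)
  | fuel + 1, i =>
    if h : i < lines.length then
      if PySem.Str.isIn "with self.client.request(" lines[i] then
        if (pvScanA lines lines.length i false i).1 then
          ((pvGoA lines fuel ((pvScanA lines lines.length i false i).2 + 1)).1,
           (pvGoA lines fuel ((pvScanA lines lines.length i false i).2 + 1)).2 + 1)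
        else
          (lines[i] :: (pvGoA lines fuel (i + 1)).1, (pvGoA lines fuel (i + 1)).2)
      else
        (lines[i] :: (pvGoA lines fuel (i + 1)).1, (pvGoA lines fuel (i + 1)).2)
    else ([], 0)

def remove_css_requests (content : String) : String × Int :=
  let lines := (PySem.Str.split? content "\n").getD []   -- '\n' ≠ '', so split? is exact here
  (PySem.Str.join "\n" (pvGoA lines lines.length 0).1, (pvGoA lines lines.length 0).2)

-- ===== PORT B =====

def pvCssTokens : List String :=
  [".css\"", "\"Sec-Fetch-Dest\": \"style\"", "\"Accept\": \"text/css", ".woff\"",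
   ".woff2\"", ".ttf\"", ".otf\"", "\"Sec-Fetch-Dest\": \"font\"",
   "\"Accept\": \"application/font"]

-- the inner 'k' while loop of Source B's _scan_block
def pvFindPassB (lines : List String) : Nat → Nat → Option Nat
  | 0, _ => none
  | fuel + 1, k =>
    if h : k < lines.length then
      if PySem.Str.isIn "pass" (PySem.Str.strip lines[k]) then some k
      else pvFindPassB lines fuel (k + 1)
    else none

-- Source B _scan_block's 'j' while loop (any over the token tuple)
def pvScanBGo (lines : List String) : Nat → Nat → Bool → Nat → Bool × Nat
  | 0, _, isCss, blockEnd => (isCss, blockEnd)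
  | fuel + 1, j, isCss, blockEnd =>
    if h : j < lines.length then
      if PySem.Str.isIn ") as resp:" lines[j] then
        match pvFindPassB lines lines.length (j + 1) with
        | some k => ((if pvCssTokens.any (fun tok => PySem.Str.isIn tok lines[j]) then true else isCss), k)
        | none => pvScanBGo lines fuel (j + 1) (if pvCssTokens.any (fun tok => PySem.Str.isIn tok lines[j]) then true else isCss) blockEnd
      else pvScanBGo lines fuel (j + 1) (if pvCssTokens.any (fun tok => PySem.Str.isIn tok lines[j]) then true else isCss) blockEnd
    else (isCss, blockEnd)

def pvScanB (lines : List String) (i : Nat) : Bool × Nat :=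
  pvScanBGo lines lines.length i false i

-- Source B pass 1: collect inclusive spans of CSS/font blocks
def pvCollectSpans (lines : List String) : Nat → Nat → List (Nat × Nat)
  | 0, _ => []
  | fuel + 1, i =>
    if h : i < lines.length then
      if PySem.Str.isIn "with self.client.request(" lines[i] then
        if (pvScanB lines i).1 then
          (i, (pvScanB lines i).2) :: pvCollectSpans lines fuel ((pvScanB lines i).2 + 1)
        else pvCollectSpans lines fuel (i + 1)
      else pvCollectSpans lines fuel (i + 1)
    else []

def remove_css_requests_alt (content : String) : String × Int :=
  let lines := (PySem.Str.split? content "\n").getD []   -- '\n' ≠ '', so split? is exact here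
  let spans := pvCollectSpans lines lines.length 0
  let kept := (PySem.List.enumerate lines).filter
    (fun p => !(spans.any (fun se => decide ((se.1 : Int) ≤ p.1) && decide (p.1 ≤ (se.2 : Int)))))
  (PySem.Str.join "\n" (kept.map (·.2)), (spans.length : Int))

-- ===== PRECONDITION & SPEC =====
def Spec_remove_css_requests (content : String) (out : String × Int) : Prop := out = remove_css_requests_alt content
instance (content : String) (out : String × Int) : Decidable (Spec_remove_css_requests content out) := by unfold Spec_remove_css_requests; infer_instance

-- ===== CLAIM (what is proved, stated in full; the proofs are below) =====
def Claim_equal_remove_css_requests : Prop := ∀ (content : String), Dom_remove_css_requests content → Spec_remove_css_requests content (remove_css_requests content)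

-- ===== LEMMAS AND PROOFS =====

-- the filter predicate of B, as a named function
def pvCov (spans : List (Nat × Nat)) (x : Int) : Bool :=
  spans.any (fun se => decide ((se.1 : Int) ≤ x) && decide (x ≤ (se.2 : Int)))

theorem pvFindPassB_eq (lines : List String) (fuel k : Nat) :
    pvFindPassB lines fuel k = pvFindPass lines fuel k := by
  induction fuel generalizing k with
  | zero => rfl
  | succ fuel ih => rw [pvFindPass, pvFindPassB, ih]

theorem pvFindPass_ge (lines : List String) (fuel k m : Nat)
    (h : pvFindPass lines fuel k = some m) : k ≤ m := by
  induction fuel generalizing k with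
  | zero => simp [pvFindPass] at h
  | succ fuel ih =>
    rw [pvFindPass] at h
    split at h
    · split at h
      · injection h with h; omega
      · have := ih (k + 1) h; omega
    · simp at h

theorem pvFindPass_lt (lines : List String) (fuel k m : Nat)
    (h : pvFindPass lines fuel k = some m) : m < lines.length := by
  induction fuel generalizing k with
  | zero => simp [pvFindPass] at h
  | succ fuel ih =>
    rw [pvFindPass] at h
    split at h
    · split at h
      · injection h with h; omega
      · exact ih (k + 1) h
    · simp at h

theorem tokAnyRaw (cur : String) :
    (pvCssTokens.any fun tok => PySem.Str.isIn tok cur) = pvIsCssLineA cur := by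
  simp [pvCssTokens, pvIsCssLineA, Bool.or_assoc]

-- A's scan and B's scan agree (same loop; the or-chain is the any over the token list)
theorem pvScan_eq (lines : List String) (fuel j : Nat) (isCss : Bool) (blockEnd : Nat) :
    pvScanA lines fuel j isCss blockEnd = pvScanBGo lines fuel j isCss blockEnd := by
  induction fuel generalizing j isCss with
  | zero => rfl
  | succ fuel ih =>
    rw [pvScanA, pvScanBGo, pvFindPassB_eq]
    simp only [tokAnyRaw]
    by_cases h : j < lines.length
    · rw [dif_pos h, dif_pos h]
      by_cases hr : PySem.Str.isIn ") as resp:" lines[j] = true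
      · rw [if_pos hr, if_pos hr]
        cases pvFindPass lines lines.length (j + 1) with
        | some k => rfl
        | none => exact ih (j + 1) _
      · rw [if_neg hr, if_neg hr]
        exact ih (j + 1) _
    · rw [dif_neg h, dif_neg h]

-- a block never ends before its starting line, and ends inside the lines
theorem pvScanBGo_snd_ge (lines : List String) (fuel j : Nat) (isCss : Bool) (blockEnd : Nat) :
    blockEnd ≤ (pvScanBGo lines fuel j isCss blockEnd).2 ∨ j < (pvScanBGo lines fuel j isCss blockEnd).2 := by
  induction fuel generalizing j isCss with
  | zero => left; rfl
  | succ fuel ih =>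
    rw [pvScanBGo]
    split
    · split
      · cases hfp : pvFindPassB lines lines.length (j + 1) with
        | some k =>
          dsimp only
          rw [pvFindPassB_eq] at hfp
          have := pvFindPass_ge lines lines.length (j + 1) k hfp
          omega
        | none =>
          dsimp only
          exact (ih (j + 1) _).imp (fun h' => h') (fun h' => by omega)
      · exact (ih (j + 1) _).imp (fun h' => h') (fun h' => by omega)
    · left; rfl

theorem pvScanBGo_snd_lt (lines : List String) (fuel j : Nat) (isCss : Bool) (blockEnd : Nat)
    (hb : blockEnd < lines.length) :
    (pvScanBGo lines fuel j isCss blockEnd).2 < lines.length := by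
  induction fuel generalizing j isCss with
  | zero => exact hb
  | succ fuel ih =>
    rw [pvScanBGo]
    split
    · split
      · cases hfp : pvFindPassB lines lines.length (j + 1) with
        | some k =>
          dsimp only
          rw [pvFindPassB_eq] at hfp
          exact pvFindPass_lt lines lines.length (j + 1) k hfp
        | none =>
          dsimp only
          exact ih (j + 1) _
      · exact ih (j + 1) _
    · exact hb

-- every collected span starts at or after i, ends at or after its start, inside the lines
theorem pvCollectSpans_bounds (lines : List String) (fuel i : Nat) :
    ∀ se ∈ pvCollectSpans lines fuel i, i ≤ se.1 ∧ se.1 ≤ se.2 ∧ se.2 < lines.length := by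
  induction fuel generalizing i with
  | zero => intro se hse; simp [pvCollectSpans] at hse
  | succ fuel ih =>
    intro se hse
    rw [pvCollectSpans] at hse
    split at hse
    · rename_i h
      split at hse
      · split at hse
        · rcases List.mem_cons.mp hse with rfl | hse
          · refine ⟨le_refl _, ?_, ?_⟩
            · rcases pvScanBGo_snd_ge lines lines.length i false i with h' | h' <;>
                simp only [pvScanB] at * <;> omega
            · exact pvScanBGo_snd_lt lines lines.length i false i h
          · have := ih _ se hse
            rcases pvScanBGo_snd_ge lines lines.length i false i with h' | h' <;>
              simp only [pvScanB] at * <;> omega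
        · have := ih _ se hse; omega
      · have := ih _ se hse; omega
    · simp at hse

-- an element of the dropped enumerate has index ≥ the drop point
theorem enumerate_drop_idx (lines : List String) (t : Nat) :
    ∀ p ∈ (PySem.List.enumerate lines).drop t, (t : Int) ≤ p.1 := by
  intro p hp
  rcases List.mem_iff_getElem.mp hp with ⟨k, hk, hget⟩
  rw [List.getElem_drop] at hget
  have hlen : t + k < (PySem.List.enumerate lines).length := by
    have := List.length_drop (l := PySem.List.enumerate lines) (i := t)
    omega
  rw [PySem.List.getElem_enumerate] at hget
  subst hget
  simp

-- dropping the enumerate at t < len peels off (t, lines[t])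
theorem enumerate_drop_cons (lines : List String) (t : Nat) (h : t < lines.length) :
    (PySem.List.enumerate lines).drop t =
      ((t : Int), lines[t]) :: (PySem.List.enumerate lines).drop (t + 1) := by
  have hlen : t < (PySem.List.enumerate lines).length := by
    simpa [PySem.List.length_enumerate] using h
  rw [List.drop_eq_getElem_cons hlen, PySem.List.getElem_enumerate]
  simp

-- the span (i, e) swallows exactly the lines t..e of the filtered suffix
theorem filter_cons_span (lines : List String) (spans : List (Nat × Nat)) (i e t : Nat)
    (hit : i ≤ t) (hte : t ≤ e + 1) :
    ((PySem.List.enumerate lines).drop t).filter (fun p => !pvCov ((i, e) :: spans) p.1) =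
    ((PySem.List.enumerate lines).drop (e + 1)).filter (fun p => !pvCov spans p.1) := by
  induction hn : e + 1 - t generalizing t with
  | zero =>
    have : t = e + 1 := by omega
    subst this
    apply List.filter_congr
    intro p hp
    have hge := enumerate_drop_idx lines (e + 1) p hp
    simp only [pvCov, List.any_cons]
    have : decide (p.1 ≤ (((i, e) : Nat × Nat).2 : Int)) = false := by
      simp only [decide_eq_false_iff_not]
      push_cast at hge ⊢
      omega
    simp [this]
  | succ n ih =>
    by_cases hlen : t < lines.length
    · rw [enumerate_drop_cons lines t hlen]
      have hcov : pvCov ((i, e) :: spans) (t : Int) = true := by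
        simp only [pvCov, List.any_cons]
        have h1 : ((i : Nat) : Int) ≤ (t : Int) := by exact_mod_cast hit
        have h2 : ((t : Nat) : Int) ≤ (e : Int) := by omega
        simp [h1, h2]
      rw [List.filter_cons]
      simp only [hcov]
      simp only [Bool.not_true, Bool.false_eq_true, if_false]
      exact ih (t + 1) (by omega) (by omega) (by omega)
    · have h1 : ((PySem.List.enumerate lines).drop t) = [] := by
        apply List.drop_eq_nil_of_le
        simp [PySem.List.length_enumerate]; omega
      have h2 : ((PySem.List.enumerate lines).drop (e + 1)) = [] := by
        apply List.drop_eq_nil_of_le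
        simp [PySem.List.length_enumerate]; omega
      rw [h1, h2]
      rfl

-- outside every span, the head filter keeps the line
theorem cov_lt_false (spans : List (Nat × Nat)) (x : Int)
    (h : ∀ se ∈ spans, x < (se.1 : Int)) : pvCov spans x = false := by
  simp only [pvCov, List.any_eq_false]
  intro se hse
  have := h se hse
  simp
  omega

-- MAIN: A's interleaved loop from i = B's filter of the suffix by the spans collected from i
theorem pvGoA_eq (lines : List String) (fuel i : Nat) (hfuel : lines.length ≤ fuel + i) :
    pvGoA lines fuel i =
      ((((PySem.List.enumerate lines).drop i).filter
          (fun p => !pvCov (pvCollectSpans lines fuel i) p.1)).map (·.2),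
       ((pvCollectSpans lines fuel i).length : Int)) := by
  induction fuel generalizing i with
  | zero =>
    have h1 : ((PySem.List.enumerate lines).drop i) = [] := by
      apply List.drop_eq_nil_of_le
      simp [PySem.List.length_enumerate]; omega
    rw [h1]
    rfl
  | succ fuel ih =>
    rw [pvGoA, pvCollectSpans]
    by_cases h : i < lines.length
    · rw [dif_pos h, dif_pos h]
      by_cases ht : PySem.Str.isIn "with self.client.request(" lines[i] = true
      · rw [if_pos ht, if_pos ht]
        have hbeq : (pvScanA lines lines.length i false i) = pvScanB lines i := by
          rw [pvScanB, pvScan_eq]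
        rw [hbeq]
        by_cases hc : (pvScanB lines i).1 = true
        · rw [if_pos hc, if_pos hc]
          have hge : i ≤ (pvScanB lines i).2 := by
            rcases pvScanBGo_snd_ge lines lines.length i false i with h' | h' <;>
              simp only [pvScanB] at * <;> omega
          rw [filter_cons_span lines _ i _ i (le_refl i) (by omega)]
          rw [ih ((pvScanB lines i).2 + 1) (by omega)]
          simp only [List.length_cons]
          norm_cast
        · rw [if_neg hc, if_neg hc]
          have hcov : pvCov (pvCollectSpans lines fuel (i + 1)) (i : Int) = false := by
            apply cov_lt_false
            intro se hse
            have := (pvCollectSpans_bounds lines fuel (i + 1) se hse).1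
            omega
          rw [enumerate_drop_cons lines i h, List.filter_cons]
          simp [hcov, ih (i + 1) (by omega)]
      · rw [if_neg ht, if_neg ht]
        have hcov : pvCov (pvCollectSpans lines fuel (i + 1)) (i : Int) = false := by
          apply cov_lt_false
          intro se hse
          have := (pvCollectSpans_bounds lines fuel (i + 1) se hse).1
          omega
        rw [enumerate_drop_cons lines i h, List.filter_cons]
        simp [hcov, ih (i + 1) (by omega)]
    · rw [dif_neg h, dif_neg h]
      have h1 : ((PySem.List.enumerate lines).drop i) = [] := by
        apply List.drop_eq_nil_of_le
        simp [PySem.List.length_enumerate]; omega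
      rw [h1]
      rfl

-- ===== VERDICT (by name: the statement is the Claim_ definition above) =====
theorem remove_css_requests_spec : Claim_equal_remove_css_requests := by
  intro content _
  unfold Spec_remove_css_requests remove_css_requests remove_css_requests_alt
  show (PySem.Str.join "\n" (pvGoA ((PySem.Str.split? content "\n").getD []) ((PySem.Str.split? content "\n").getD []).length 0).1,
        (pvGoA ((PySem.Str.split? content "\n").getD []) ((PySem.Str.split? content "\n").getD []).length 0).2) = _
  rw [pvGoA_eq ((PySem.Str.split? content "\n").getD []) _ 0 (by omega), List.drop_zero]
  rfl
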